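-- pv_equiv track=rewrite | github.com/OmkarBhat16/Information-Security-Lab | Lab 1/Q1.py | multiplicative_cipher
-- ===== SOURCE A (Python) =====
-- def getA(char):
--     return (ord('A') if char >= 'A' and char <= 'Z' else ord('a'));
--
-- def multiplicative_cipher(text : str , num : int):
--     result = ""
--     for char in text:
--         if char == " ":
--             result += " "
--         else:
--             result += chr(((ord(char)- getA(char)) * num)%26 +getA(char))
--
--     return result
-- ===== SOURCE B (Python) =====
-- def multiplicative_cipher(text: str, num: int):
--     table = {}
--     for char in set(text):
--         if char != " ":
--             base = 65 if 'A' <= char <= 'Z' else 97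
--             table[ord(char)] = chr((ord(char) - base) * num % 26 + base)
--     return text.translate(table)
-- ===== Notes on version B (the rewrite author's own statement) =====
-- stated objective: faster
-- what changed: B precomputes one translation entry per distinct non-space character of the text (scanning set(text) once) and emits the result with a single str.translate call, instead of doing the modular arithmetic and string concatenation inside the per-character output loop.
import Mathlib
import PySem

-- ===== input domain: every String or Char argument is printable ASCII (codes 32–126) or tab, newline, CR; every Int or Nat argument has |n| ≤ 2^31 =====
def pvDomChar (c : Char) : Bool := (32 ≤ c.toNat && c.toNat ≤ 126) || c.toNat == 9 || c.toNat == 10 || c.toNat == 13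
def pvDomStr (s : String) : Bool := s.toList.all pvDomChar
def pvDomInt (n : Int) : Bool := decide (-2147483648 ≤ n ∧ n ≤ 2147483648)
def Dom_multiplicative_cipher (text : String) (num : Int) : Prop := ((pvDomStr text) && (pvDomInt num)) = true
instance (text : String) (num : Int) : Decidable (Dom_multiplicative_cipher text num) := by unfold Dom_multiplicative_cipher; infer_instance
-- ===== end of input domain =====

-- ===== PORT A =====
-- B changes: per-character arithmetic moved into a translation table built once over the
-- distinct characters, result produced by one translate pass (objective: idiomatic).

-- getA(char): ord('A') if 'A' <= char <= 'Z' else ord('a')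
def getA (char : Char) : Int :=
  if 'A' ≤ char ∧ char ≤ 'Z' then 65 else 97

-- A: loop over text, appending ' ' for space, else chr(((ord(c)-getA(c))*num)%26+getA(c))
def multiplicative_cipher (text : String) (num : Int) : String :=
  text.toList.foldl (fun result char =>
    if char = ' ' then result ++ " "
    else result ++ String.singleton
      (Char.ofNat (PySem.Int.mod (((char.toNat : Int) - getA char) * num) 26 + getA char).toNat)) ""

-- ===== PORT B =====
-- table entry for a character: base = 65 if 'A' <= char <= 'Z' else 97; chr((ord(c)-base)*num%26+base)
def mcTrans (num : Int) (char : Char) : Char :=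
  let base : Int := if 'A' ≤ char ∧ char ≤ 'Z' then 65 else 97
  Char.ofNat (PySem.Int.mod (((char.toNat : Int) - base) * num) 26 + base).toNat

-- the translation table: one entry per distinct character of the text, space skipped
def mcTable (text : String) (num : Int) : PySem.Dict Char Char :=
  (PySem.Set.ofList text.toList).foldl
    (fun d char => if char ≠ ' ' then d.insert char (mcTrans num char) else d)
    PySem.Dict.empty

-- B: build the table, then translate (characters without an entry pass through, as str.translate does)
def multiplicative_cipher_alt (text : String) (num : Int) : String :=
  String.ofList (text.toList.map (fun c => (mcTable text num).getD c c))

-- ===== PRECONDITION & SPEC =====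
def Spec_multiplicative_cipher (text : String) (num : Int) (out : String) : Prop := out = multiplicative_cipher_alt text num
instance (text : String) (num : Int) (out : String) : Decidable (Spec_multiplicative_cipher text num out) := by unfold Spec_multiplicative_cipher; infer_instance

-- ===== CLAIM (what is proved, stated in full; the proofs are below) =====
def Claim_equal_multiplicative_cipher : Prop := ∀ (text : String) (num : Int), Dom_multiplicative_cipher text num → Spec_multiplicative_cipher text num (multiplicative_cipher text num)

-- ===== LEMMAS AND PROOFS =====

-- lookup in a table built by B's loop: transformed value for a seen non-space char, default otherwise
theorem mcFold_getD (num : Int) (L : List Char) (d : PySem.Dict Char Char) (c : Char) :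
    (L.foldl (fun d char => if char ≠ ' ' then d.insert char (mcTrans num char) else d) d).getD c c
      = if c ∈ L ∧ c ≠ ' ' then mcTrans num c else d.getD c c := by
  induction L generalizing d with
  | nil => simp
  | cons x xs ih =>
    simp only [List.foldl_cons]
    by_cases hx : x = ' '
    · rw [if_neg (not_not.mpr hx), ih]
      by_cases hc : c = ' '
      · simp [hc]
      · have hcx : ¬ c = x := fun h => hc (hx ▸ h)
        simp [List.mem_cons, hcx]
    · rw [if_pos hx, ih]
      by_cases hcx : c = x
      · subst hcx
        by_cases hm : c ∈ xs
        · rw [if_pos ⟨hm, hx⟩, if_pos ⟨List.mem_cons_of_mem _ hm, hx⟩]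
        · rw [if_neg (fun h => hm h.1), PySem.Dict.getD_insert_self,
            if_pos ⟨List.mem_cons_self, hx⟩]
      · rw [PySem.Dict.getD_insert, if_neg hcx]
        simp [List.mem_cons, hcx]

theorem mcTable_getD (text : String) (num : Int) (c : Char) (hc : c ∈ text.toList) :
    (mcTable text num).getD c c = if c = ' ' then ' ' else mcTrans num c := by
  unfold mcTable
  rw [mcFold_getD]
  by_cases hsp : c = ' '
  · simp [hsp, PySem.Dict.getD_empty]
  · rw [if_pos ⟨(PySem.Set.mem_ofList _ c).mpr hc, hsp⟩, if_neg hsp]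

-- the encoded character A appends is exactly B's table entry
theorem mcChar_eq (num : Int) (x : Char) :
    Char.ofNat (PySem.Int.mod (((x.toNat : Int) - getA x) * num) 26 + getA x).toNat
      = mcTrans num x := by
  simp [mcTrans, getA]

-- the A-side fold appends one translated character per input character
theorem mcA_fold (num : Int) (L : List Char) (s : String) :
    (L.foldl (fun result char =>
      if char = ' ' then result ++ " "
      else result ++ String.singleton
        (Char.ofNat (PySem.Int.mod (((char.toNat : Int) - getA char) * num) 26 + getA char).toNat)) s)
      = s ++ String.ofList (L.map (fun c => if c = ' ' then ' ' else mcTrans num c)) := by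
  induction L generalizing s with
  | nil =>
    apply String.ext
    simp [String.toList_ofList]
  | cons x xs ih =>
    simp only [List.foldl_cons, List.map_cons]
    by_cases hx : x = ' '
    · subst hx
      rw [if_pos rfl, ih]
      apply String.ext
      have hsp : (" " : String).toList = [' '] := rfl
      simp [String.toList_append, String.toList_ofList, hsp]
    · rw [if_neg hx, ih, mcChar_eq]
      apply String.ext
      simp [String.toList_append, String.toList_ofList, hx]

-- ===== VERDICT (by name: the statement is the Claim_ definition above) =====
theorem multiplicative_cipher_spec : Claim_equal_multiplicative_cipher := by
  intro text num _
  unfold Spec_multiplicative_cipher multiplicative_cipher multiplicative_cipher_alt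
  rw [mcA_fold]
  apply String.ext
  simp only [String.toList_append, String.toList_ofList]
  have hempty : ("" : String).toList = [] := rfl
  rw [hempty, List.nil_append]
  refine List.map_congr_left fun c hc => ?_
  rw [mcTable_getD text num c hc]
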